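-- pv_equiv track=rewrite | github.com/pytorch/pytorch | torch/testing/_internal/inputgen/specs/function.py | broadcast_with
-- ===== SOURCE A (Python) =====
-- def broadcast_with(shape, rank, d):
--     n = len(shape)
--     if d < rank - n:
--         return None
--     for ix, s in enumerate(shape):
--         if n - ix == rank - d:
--             if s == 1:
--                 return None
--             return list({1, s})
-- ===== SOURCE B (Python) =====
-- def broadcast_with(shape, rank, d):
--     n = len(shape)
--     ix = n - (rank - d)
--     if ix < 0 or ix >= n:
--         return None
--     s = shape[ix]
--     if s == 1:
--         return None
--     return list({1, s})
-- ===== Notes on version B (the rewrite author's own statement) =====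
-- stated objective: simpler
-- what changed: B computes the single matching index ix = n - (rank - d) in closed form and indexes the list directly, instead of A's linear enumerate-scan for the position with n - ix == rank - d; the out-of-range cases reproduce A's guard and fall-off-the-loop None.
import Mathlib
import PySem

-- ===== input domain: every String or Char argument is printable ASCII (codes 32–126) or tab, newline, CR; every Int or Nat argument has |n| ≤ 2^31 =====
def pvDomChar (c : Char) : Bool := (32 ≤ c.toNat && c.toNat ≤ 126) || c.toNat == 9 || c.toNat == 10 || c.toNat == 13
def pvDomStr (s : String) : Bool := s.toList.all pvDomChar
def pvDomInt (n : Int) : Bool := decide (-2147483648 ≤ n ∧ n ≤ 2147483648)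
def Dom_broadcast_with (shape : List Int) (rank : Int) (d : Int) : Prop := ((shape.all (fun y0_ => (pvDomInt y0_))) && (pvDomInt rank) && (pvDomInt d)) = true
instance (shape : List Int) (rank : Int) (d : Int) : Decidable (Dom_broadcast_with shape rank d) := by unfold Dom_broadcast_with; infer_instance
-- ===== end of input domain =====

-- B replaces A's linear enumerate-scan for the index with n - ix == rank - d by the closed-form
-- index ix = n - (rank - d) plus a bounds check (objective: simpler).


-- ===== PORT A =====
-- hand port of Python's 'list({1, s})' for s ≠ 1 (both Pythons call it verbatim): with CPython's
-- small-int hashing (hash(s) = s except hash(-1) = -2) and an 8-slot table, s lands in slot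
-- hash(s) % 8 and iteration is by slot, so s precedes 1 exactly when hash(s) % 8 == 0.
-- Exact for |s| ≤ 2^31 (Dom). Lean's % with the positive divisor 8 agrees with Python's.
def pySetOneWith (s : Int) : List Int :=
  if (if s = -1 then (-2 : Int) else s) % 8 = 0 then [s, 1] else [1, s]

-- the 'for ix, s in enumerate(shape)' loop of A (returns on the first hit, none if it falls off)
def bwLoop (rank d n : Int) : List Int → Int → Option (List Int)
  | [], _ => none
  | s :: rest, ix =>
    if n - ix = rank - d then
      if s = 1 then none else some (pySetOneWith s)
    else bwLoop rank d n rest (ix + 1)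

def broadcast_with (shape : List Int) (rank : Int) (d : Int) : Option (List Int) :=
  let n : Int := shape.length
  if d < rank - n then none
  else bwLoop rank d n shape 0

-- ===== PORT B =====
def broadcast_with_alt (shape : List Int) (rank : Int) (d : Int) : Option (List Int) :=
  let n : Int := shape.length
  let ix := n - (rank - d)
  if ix < 0 ∨ n ≤ ix then none
  else
    match PySem.List.pyGet? shape ix with
    | none => none
    | some s => if s = 1 then none else some (pySetOneWith s)

-- ===== PRECONDITION & SPEC =====
def Spec_broadcast_with (shape : List Int) (rank : Int) (d : Int) (out : Option (List Int)) : Prop := out = broadcast_with_alt shape rank d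
instance (shape : List Int) (rank : Int) (d : Int) (out : Option (List Int)) : Decidable (Spec_broadcast_with shape rank d out) := by unfold Spec_broadcast_with; infer_instance

-- ===== CLAIM (what is proved, stated in full; the proofs are below) =====
def Claim_equal_broadcast_with : Prop := ∀ (shape : List Int) (rank : Int) (d : Int), Dom_broadcast_with shape rank d → Spec_broadcast_with shape rank d (broadcast_with shape rank d)

-- ===== LEMMAS AND PROOFS =====
-- the scan starting at counter ix0 hits exactly the relative index n - rank + d - ix0
theorem bwLoop_eq (rank d n : Int) :
    ∀ (shape : List Int) (ix0 : Int),
      bwLoop rank d n shape ix0 =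
        (if 0 ≤ n - rank + d - ix0 then
          match shape[(n - rank + d - ix0).toNat]? with
          | some s => if s = 1 then none else some (pySetOneWith s)
          | none => none
        else none) := by
  intro shape
  induction shape with
  | nil =>
    intro ix0
    simp [bwLoop]
  | cons s rest ih =>
    intro ix0
    by_cases h : n - ix0 = rank - d
    · have ht : n - rank + d - ix0 = 0 := by omega
      simp [bwLoop, h, ht]
    · have hne : ¬ (n - ix0 = rank - d) := h
      rw [bwLoop, if_neg hne, ih (ix0 + 1)]
      by_cases hp : 0 ≤ n - rank + d - ix0
      · by_cases h0 : n - rank + d - ix0 = 0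
        · omega
        · have hp' : 0 ≤ n - rank + d - (ix0 + 1) := by omega
          have hidx : (n - rank + d - ix0).toNat = (n - rank + d - (ix0 + 1)).toNat + 1 := by omega
          rw [if_pos hp, if_pos hp', hidx]
          simp
      · have hp' : ¬ 0 ≤ n - rank + d - (ix0 + 1) := by omega
        rw [if_neg hp, if_neg hp']

-- ===== VERDICT (by name: the statement is the Claim_ definition above) =====
theorem broadcast_with_spec : Claim_equal_broadcast_with := by
  intro shape rank d _
  unfold Spec_broadcast_with broadcast_with broadcast_with_alt
  set n : Int := (shape.length : Int) with hn
  by_cases hg : d < rank - n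
  · have : n - (rank - d) < 0 := by omega
    simp [hg, this]
  · rw [if_neg hg, bwLoop_eq]
    have hpos : 0 ≤ n - rank + d := by omega
    by_cases hbig : n ≤ n - (rank - d)
    · have hnone : shape[(n - rank + d - 0).toNat]? = none :=
        List.getElem?_eq_none (by omega)
      rw [if_pos (by omega), if_pos (Or.inr hbig), hnone]
    · rw [if_pos (by omega), if_neg (by omega)]
      have hlt : (n - rank + d - 0).toNat < shape.length := by omega
      have hcast : (n - (rank - d)) = (((n - rank + d - 0).toNat : Nat) : Int) := by omega
      rw [hcast, PySem.List.pyGet?_natCast, sub_zero]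
      cases shape[(n - rank + d).toNat]? with
      | none => rfl
      | some s => rfl
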